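-- pv_equiv track=rewrite | github.com/jaechang-hits/Biomni_HITS | biomni/agent/workflow_postprocessor.py | _find_import_section
-- ===== SOURCE A (Python) =====
-- from typing import List, Dict, Set, Optional, Tuple
--
-- def _find_import_section(code: str) -> Optional[Dict[str, int]]:
--     """Find the import section in code."""
--     lines = code.split('\n')
--     import_start = None
--     import_end = None
--
--     for i, line in enumerate(lines):
--         stripped = line.strip()
--         if stripped.startswith(('import ', 'from ')):
--             if import_start is None:
--                 import_start = i
--             import_end = i + 1
--         elif import_start is not None and stripped and not stripped.startswith('#'):
--             # End of import section
--             break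
--
--     if import_start is not None:
--         # Calculate character positions
--         start_pos = sum(len(lines[i]) + 1 for i in range(import_start))
--         end_pos = sum(len(lines[i]) + 1 for i in range(import_end)) if import_end else start_pos
--         return {"start": start_pos, "end": end_pos}
--
--     return None
-- ===== SOURCE B (Python) =====
-- from typing import Optional, Dict
--
--
-- def _is_import_line(line: str) -> bool:
--     s = line.strip()
--     return s.startswith('import ') or s.startswith('from ')
--
--
-- def _find_import_section(code: str) -> Optional[Dict[str, int]]:
--     """Find the import section in code."""
--     lines = iter(code.split('\n'))
--     pos = 0
--     start = None
--     # Phase 1: skip forward to the first import line, keeping a running char offset.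
--     for line in lines:
--         nxt = pos + len(line) + 1
--         if _is_import_line(line):
--             start = pos
--             end = nxt
--             pos = nxt
--             break
--         pos = nxt
--     if start is None:
--         return None
--     # Phase 2: extend the section; end tracks the char just past the last import line.
--     for line in lines:
--         nxt = pos + len(line) + 1
--         if _is_import_line(line):
--             end = nxt
--         else:
--             s = line.strip()
--             if s and not s.startswith('#'):
--                 break
--         pos = nxt
--     return {"start": start, "end": end}
-- ===== Notes on version B (the rewrite author's own statement) =====
-- stated objective: simpler
-- what changed: Single pass with a running character offset split into two phases (find first import line, then extend the section), eliminating the line-index bookkeeping and the two post-loop sum() passes over the lines.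
import Mathlib
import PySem

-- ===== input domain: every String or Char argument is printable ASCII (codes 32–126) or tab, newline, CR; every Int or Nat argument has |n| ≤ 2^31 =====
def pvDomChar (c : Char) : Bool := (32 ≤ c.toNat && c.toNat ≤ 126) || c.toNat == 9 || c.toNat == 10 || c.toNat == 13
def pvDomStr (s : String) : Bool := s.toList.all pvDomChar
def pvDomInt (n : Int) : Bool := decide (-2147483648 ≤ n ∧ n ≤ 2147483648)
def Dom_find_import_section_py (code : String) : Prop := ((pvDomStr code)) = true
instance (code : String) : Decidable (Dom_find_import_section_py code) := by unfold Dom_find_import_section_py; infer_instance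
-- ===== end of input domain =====

-- B replaces A's enumerate-indices-then-two-sum()-passes with a single running-offset pass
-- split into two phases (find the first import line, then extend the section); objective: simpler.

-- ===== PORT A =====
-- the for-loop of A: state (i, import_start, import_end); break modelled by returning the state
def aLoop : List String → Nat → Option Nat → Option Nat → Option Nat × Option Nat
  | [], _, st, en => (st, en)
  | line :: rest, i, st, en =>
    if PySem.Str.startswith (PySem.Str.strip line) "import "
        || PySem.Str.startswith (PySem.Str.strip line) "from " then
      aLoop rest (i + 1) (if st.isNone then some i else st) (some (i + 1))
    else if st.isSome && PySem.Str.strip line != ""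
        && !(PySem.Str.startswith (PySem.Str.strip line) "#") then
      (st, en)
    else
      aLoop rest (i + 1) st en

-- sum(len(lines[i]) + 1 for i in range(k))
def aSumTo (lines : List String) (k : Nat) : Int :=
  ((lines.take k).map (fun l => PySem.Str.len l + 1)).sum

def find_import_section_py (code : String) : Option (List (String × Int)) :=
  let lines := (PySem.Str.split? code "\n").getD []  -- sep ≠ "", so split? is always some
  match aLoop lines 0 none none with
  | (none, _) => none
  | (some st, en) =>
    let start_pos := aSumTo lines st
    let end_pos := match en with
      | some e => if e ≠ 0 then aSumTo lines e else start_pos  -- Python truthiness of import_end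
      | none => start_pos
    some [("start", start_pos), ("end", end_pos)]

-- ===== PORT B =====
def bIsImport (line : String) : Bool :=
  PySem.Str.startswith (PySem.Str.strip line) "import "
    || PySem.Str.startswith (PySem.Str.strip line) "from "

-- phase 1: skip to the first import line; returns (start, end, remaining lines)
def bSkip : List String → Int → Option (Int × Int × List String)
  | [], _ => none
  | line :: rest, pos =>
    if bIsImport line then some (pos, pos + (PySem.Str.len line + 1), rest)
    else bSkip rest (pos + (PySem.Str.len line + 1))

-- phase 2: extend the section; en is the char position just past the last import line
def bTail : List String → Int → Int → Int
  | [], _, en => en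
  | line :: rest, pos, en =>
    if bIsImport line then bTail rest (pos + (PySem.Str.len line + 1)) (pos + (PySem.Str.len line + 1))
    else if PySem.Str.strip line != "" && !(PySem.Str.startswith (PySem.Str.strip line) "#") then
      en
    else
      bTail rest (pos + (PySem.Str.len line + 1)) en

def find_import_section_py_alt (code : String) : Option (List (String × Int)) :=
  match bSkip ((PySem.Str.split? code "\n").getD []) 0 with
  | none => none
  | some (st, en0, rest) => some [("start", st), ("end", bTail rest en0 en0)]

-- ===== PRECONDITION & SPEC =====
def Spec_find_import_section_py (code : String) (out : Option (List (String × Int))) : Prop := out = find_import_section_py_alt code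
instance (code : String) (out : Option (List (String × Int))) : Decidable (Spec_find_import_section_py code out) := by unfold Spec_find_import_section_py; infer_instance

-- ===== CLAIM (what is proved, stated in full; the proofs are below) =====
def Claim_equal_find_import_section_py : Prop := ∀ (code : String), Dom_find_import_section_py code → Spec_find_import_section_py code (find_import_section_py code)

-- ===== LEMMAS AND PROOFS =====

-- A's loop with char positions instead of line indices (proof-only intermediate)
def aOff : List String → Int → Option Int → Option Int → Option Int × Option Int
  | [], _, st, en => (st, en)
  | line :: rest, pos, st, en =>
    if PySem.Str.startswith (PySem.Str.strip line) "import "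
        || PySem.Str.startswith (PySem.Str.strip line) "from " then
      aOff rest (pos + (PySem.Str.len line + 1)) (if st.isNone then some pos else st)
        (some (pos + (PySem.Str.len line + 1)))
    else if st.isSome && PySem.Str.strip line != ""
        && !(PySem.Str.startswith (PySem.Str.strip line) "#") then
      (st, en)
    else
      aOff rest (pos + (PySem.Str.len line + 1)) st en

theorem aSumTo_succ (lines : List String) (i : Nat) (line : String) (rest : List String)
    (h : lines.drop i = line :: rest) :
    aSumTo lines (i + 1) = aSumTo lines i + (PySem.Str.len line + 1) := by
  unfold aSumTo
  rw [List.take_add, List.map_append, List.sum_append, h]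
  simp

-- A's index loop mapped through aSumTo is the offset loop
theorem aLoop_to_aOff (lines : List String) : ∀ (rest : List String) (i : Nat)
    (st en : Option Nat), lines.drop i = rest →
    aOff rest (aSumTo lines i) (st.map (fun k => aSumTo lines k)) (en.map (fun k => aSumTo lines k))
      = ((aLoop rest i st en).1.map (fun k => aSumTo lines k),
         (aLoop rest i st en).2.map (fun k => aSumTo lines k)) := by
  intro rest
  induction rest with
  | nil => intro i st en _; simp [aLoop, aOff]
  | cons line rest ih =>
    intro i st en hdrop
    have hdrop' : lines.drop (i + 1) = rest := by
      have := congrArg (List.drop 1) hdrop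
      simpa [List.drop_drop, Nat.add_comm] using this
    have hs := aSumTo_succ lines i line rest hdrop
    unfold aLoop aOff
    by_cases h1 : (PySem.Str.startswith (PySem.Str.strip line) "import "
        || PySem.Str.startswith (PySem.Str.strip line) "from ") = true
    · rw [if_pos h1, if_pos h1, ← hs]
      have := ih (i + 1) (if st.isNone then some i else st) (some (i + 1)) hdrop'
      cases st <;> simpa using this
    · rw [if_neg h1, if_neg h1]
      by_cases h2 : (st.isSome && PySem.Str.strip line != ""
          && !(PySem.Str.startswith (PySem.Str.strip line) "#")) = true
      · have h2' : ((st.map (fun k => aSumTo lines k)).isSome && PySem.Str.strip line != ""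
            && !(PySem.Str.startswith (PySem.Str.strip line) "#")) = true := by
          cases st <;> simp_all
        rw [if_pos h2, if_pos h2']
      · have h2' : ¬ (((st.map (fun k => aSumTo lines k)).isSome && PySem.Str.strip line != ""
            && !(PySem.Str.startswith (PySem.Str.strip line) "#")) = true) := by
          cases st <;> simp_all
        rw [if_neg h2, if_neg h2', ← hs]
        exact ih (i + 1) st en hdrop'

-- invariant: once import_start is set, import_end is set and positive
theorem aLoop_en_pos : ∀ (rest : List String) (i : Nat) (st en : Option Nat),
    (st.isSome → ∃ e, en = some e ∧ 1 ≤ e) →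
    ((aLoop rest i st en).1.isSome → ∃ e, (aLoop rest i st en).2 = some e ∧ 1 ≤ e) := by
  intro rest
  induction rest with
  | nil => intro i st en h; simpa [aLoop] using h
  | cons line rest ih =>
    intro i st en h
    unfold aLoop
    by_cases h1 : (PySem.Str.startswith (PySem.Str.strip line) "import "
        || PySem.Str.startswith (PySem.Str.strip line) "from ") = true
    · rw [if_pos h1]
      exact ih (i + 1) _ _ (fun _ => ⟨i + 1, rfl, by omega⟩)
    · rw [if_neg h1]
      by_cases h2 : (st.isSome && PySem.Str.strip line != ""
          && !(PySem.Str.startswith (PySem.Str.strip line) "#")) = true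
      · rw [if_pos h2]; exact h
      · rw [if_neg h2]; exact ih (i + 1) st en h

-- started offset loop = bTail
theorem aOff_some (rest : List String) : ∀ (pos s e : Int),
    aOff rest pos (some s) (some e) = (some s, some (bTail rest pos e)) := by
  induction rest with
  | nil => intro pos s e; simp [aOff, bTail]
  | cons line rest ih =>
    intro pos s e
    unfold aOff bTail bIsImport
    by_cases h1 : (PySem.Str.startswith (PySem.Str.strip line) "import "
        || PySem.Str.startswith (PySem.Str.strip line) "from ") = true
    · rw [if_pos h1, if_pos h1]
      simp only [Option.isNone_some, Bool.false_eq_true, if_false]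
      exact ih _ _ _
    · rw [if_neg h1, if_neg h1]
      by_cases h2 : (PySem.Str.strip line != ""
          && !(PySem.Str.startswith (PySem.Str.strip line) "#")) = true
      · have h2' : ((some s : Option Int).isSome && PySem.Str.strip line != ""
            && !(PySem.Str.startswith (PySem.Str.strip line) "#")) = true := by simp_all
        rw [if_pos h2', if_pos h2]
      · have h2' : ¬ (((some s : Option Int).isSome && PySem.Str.strip line != ""
            && !(PySem.Str.startswith (PySem.Str.strip line) "#")) = true) := by simp_all
        rw [if_neg h2', if_neg h2, ih]

-- unstarted offset loop = bSkip then bTail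
theorem aOff_none (rest : List String) : ∀ (pos : Int),
    aOff rest pos none none =
      (match bSkip rest pos with
       | none => (none, none)
       | some (st, en0, tail) => (some st, some (bTail tail en0 en0))) := by
  induction rest with
  | nil => intro pos; simp [aOff, bSkip]
  | cons line rest ih =>
    intro pos
    unfold aOff bSkip bIsImport
    by_cases h1 : (PySem.Str.startswith (PySem.Str.strip line) "import "
        || PySem.Str.startswith (PySem.Str.strip line) "from ") = true
    · rw [if_pos h1, if_pos h1]
      simp [aOff_some]
    · rw [if_neg h1, if_neg h1]
      have h2' : ¬ (((none : Option Int).isSome && PySem.Str.strip line != ""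
          && !(PySem.Str.startswith (PySem.Str.strip line) "#")) = true) := by simp
      rw [if_neg h2']
      exact ih (pos + (PySem.Str.len line + 1))

-- ===== VERDICT (by name: the statement is the Claim_ definition above) =====
theorem find_import_section_py_spec : Claim_equal_find_import_section_py := by
  intro code _
  unfold Spec_find_import_section_py find_import_section_py find_import_section_py_alt
  set lines := (PySem.Str.split? code "\n").getD [] with hl
  have hmap := aLoop_to_aOff lines lines 0 none none (by simp)
  have hsum0 : aSumTo lines 0 = 0 := by simp [aSumTo]
  rw [hsum0] at hmap
  simp only [Option.map_none] at hmap
  rw [aOff_none] at hmap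
  cases hsk : bSkip lines 0 with
  | none =>
    rw [hsk] at hmap
    cases hA : aLoop lines 0 none none with
    | mk st en =>
      rw [hA] at hmap
      cases st with
      | none => simp [hA]
      | some k => simp at hmap
  | some r =>
    obtain ⟨st0, en0, tail⟩ := r
    rw [hsk] at hmap
    cases hA : aLoop lines 0 none none with
    | mk st en =>
      rw [hA] at hmap
      cases st with
      | none => simp at hmap
      | some k =>
        have hpos := aLoop_en_pos lines 0 none none (by simp)
        rw [hA] at hpos
        obtain ⟨e, he, hge⟩ := hpos (by simp)
        subst he
        simp only [Option.map_some, Prod.mk.injEq, Option.some.injEq] at hmap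
        obtain ⟨h1, h2⟩ := hmap
        have he0 : e ≠ 0 := by omega
        simp [hA, he0, h1, h2]
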